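-- pv_equiv track=rewrite | github.com/mkishi1221/create_names_v3 | name_generator/modules/grade_phonetic.py | grade_phonetic
-- ===== SOURCE A (Python) =====
-- import copy
--
-- def grade_phonetic(text):
--
--     phonetic_pattern = ""
--     vowels = "aeiou"
--     middle = "yw"
--     approved_repeat_strings = ["ss", "ll", "oo", "ee", "tt", "rr", "pp", "nn", "mm", "ff", "gg", "cc", "dd", "bb", "zz"]
--
--     last_index = len(text) - 1
--     prev_letter = ""
--     for index, letter in enumerate(text):
--         if index != last_index and letter == text[index+1]:
--             pattern = "_"
--         elif letter in vowels:
--             pattern = "1"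
--         elif letter in middle:
--             if prev_letter in vowels:
--                 pattern = "2"
--             else:
--                 pattern = "1"
--         else:
--             pattern = "2"
--         phonetic_pattern = phonetic_pattern + pattern
--         prev_letter = letter
--
--     phonetic_pattern_for_eval = copy.deepcopy(phonetic_pattern)
--
--     if "_" in phonetic_pattern_for_eval:
--         indexes = [i for i, letter in enumerate(phonetic_pattern_for_eval) if letter == "_"]
--
--         for index in indexes:
--             repeat_str = text[index] + text[index+1]
--             if repeat_str not in approved_repeat_strings:
--                 phonetic_pattern_list = list(phonetic_pattern_for_eval)
--                 phonetic_pattern_list[index] = phonetic_pattern_list[index+1]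
--                 phonetic_pattern_for_eval = "".join(phonetic_pattern_list)
--
--     eval_pattern = phonetic_pattern_for_eval.replace("_", "")
--
--     vowel_count = eval_pattern.count("11")
--     consonant_count = eval_pattern.count("22")
--
--     if (
--         consonant_count == 0
--         and vowel_count == 0
--     ):
--         phonetic_grade = "Phonetic_A"
--     elif (
--         consonant_count == 0
--         and vowel_count == 1
--     ):
--         phonetic_grade = "Phonetic_B"
--     elif (
--         consonant_count <= 1
--         and vowel_count <= 1
--     ):
--         phonetic_grade = "Phonetic_C"
--
--     else:
--         phonetic_grade = "Phonetic_D"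
--
--     return phonetic_grade, phonetic_pattern
-- ===== SOURCE B (Python) =====
-- def grade_phonetic(text):
--     vowels = "aeiou"
--     middle = "yw"
--     approved_repeat_strings = {"ss", "ll", "oo", "ee", "tt", "rr", "pp", "nn",
--                                "mm", "ff", "gg", "cc", "dd", "bb", "zz"}
--
--     # pass 1: classify each letter, looking ahead one character
--     pattern = []
--     prev_letter = ""
--     for i, letter in enumerate(text):
--         if i + 1 < len(text) and letter == text[i + 1]:
--             p = "_"
--         elif letter in vowels:
--             p = "1"
--         elif letter in middle:
--             p = "2" if prev_letter in vowels else "1"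
--         else:
--             p = "2"
--         pattern.append(p)
--         prev_letter = letter
--
--     # pass 2: one streaming pass that resolves each '_' on the fly and counts
--     # non-overlapping "11"/"22" pairs with a skip state (prev_kept)
--     vowel_count = 0
--     consonant_count = 0
--     prev_kept = None
--     pairs = list(zip(pattern, text))
--     for i, (p, letter) in enumerate(pairs):
--         if p == "_":
--             p2, letter2 = pairs[i + 1]  # a '_' is never the last pattern char
--             if letter + letter2 in approved_repeat_strings:
--                 continue  # approved double letter: dropped from the eval stream
--             if p2 == "_":
--                 continue  # a run of repeats resolves to the run's final class
--             kept = p2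
--         else:
--             kept = p
--         if prev_kept == kept:
--             if kept == "1":
--                 vowel_count += 1
--             else:
--                 consonant_count += 1
--             prev_kept = None
--         else:
--             prev_kept = kept
--
--     if consonant_count == 0 and vowel_count == 0:
--         phonetic_grade = "Phonetic_A"
--     elif consonant_count == 0 and vowel_count == 1:
--         phonetic_grade = "Phonetic_B"
--     elif consonant_count <= 1 and vowel_count <= 1:
--         phonetic_grade = "Phonetic_C"
--     else:
--         phonetic_grade = "Phonetic_D"
--
--     return phonetic_grade, "".join(pattern)
-- ===== Notes on version B (the rewrite author's own statement) =====
-- stated objective: alternative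
-- what changed: A's per-underscore string rebuilding followed by a replace and two non-overlapping count scans is replaced by a single streaming pass over (pattern char, letter) pairs that resolves each repeat marker on the fly and counts vowel and consonant pairs with a skip state.
import Mathlib
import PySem

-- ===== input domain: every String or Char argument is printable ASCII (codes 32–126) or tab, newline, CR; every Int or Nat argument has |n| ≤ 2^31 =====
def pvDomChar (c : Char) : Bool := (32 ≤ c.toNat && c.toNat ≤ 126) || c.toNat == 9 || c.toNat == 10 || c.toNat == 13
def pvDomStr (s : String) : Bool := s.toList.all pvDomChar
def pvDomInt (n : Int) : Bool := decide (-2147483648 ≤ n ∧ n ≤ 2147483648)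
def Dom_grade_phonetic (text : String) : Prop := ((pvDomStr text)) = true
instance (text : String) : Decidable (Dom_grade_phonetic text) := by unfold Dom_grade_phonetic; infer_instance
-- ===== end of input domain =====

-- B replaces A's per-underscore string rebuilding + replace + two .count scans by one
-- streaming pass over (pattern, letter) pairs with a skip-state counter (objective: alternative).


-- ===== PORT A =====
-- Python strings are modelled as List Char; the literal string constants:
def gpA_vowels : List Char := ['a', 'e', 'i', 'o', 'u']
def gpA_middle : List Char := ['y', 'w']
def gpA_approved : List (List Char) :=
  [['s','s'], ['l','l'], ['o','o'], ['e','e'], ['t','t'], ['r','r'], ['p','p'], ['n','n'],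
   ['m','m'], ['f','f'], ['g','g'], ['c','c'], ['d','d'], ['b','b'], ['z','z']]

-- one step of A's first loop; state = (phonetic_pattern, prev_letter); prev_letter starts as ""
-- (the empty list), and '"" in vowels' is True in Python, hence PySem.Chars.isIn on the prev string.
-- text[index+1] is guarded by 'index != last_index', so pyGetD's default is never observed.
def gpA_step (cs : List Char) (st : List Char × List Char) (ic : Int × Char) : List Char × List Char :=
  let pat : Char :=
    if ic.1 ≠ PySem.List.len cs - 1 ∧ PySem.List.pyGetD cs (ic.1 + 1) ' ' = ic.2 then '_'
    else if ic.2 ∈ gpA_vowels then '1'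
    else if ic.2 ∈ gpA_middle then (if PySem.Chars.isIn st.2 gpA_vowels then '2' else '1')
    else '2'
  (st.1 ++ [pat], [ic.2])

-- one step of A's second loop: the list/set/join dance is the in-place update pySetD;
-- both indexings are in range ('_' never occurs at the last position).
def gpA_fix (cs : List Char) (s : List Char) (i : Int) : List Char :=
  if [PySem.List.pyGetD cs i ' ', PySem.List.pyGetD cs (i + 1) ' '] ∉ gpA_approved then
    PySem.List.pySetD s i (PySem.List.pyGetD s (i + 1) ' ')
  else s

def grade_phonetic (text : String) : String × String :=
  let cs := text.toList
  let phonetic_pattern := ((PySem.List.enumerate cs 0).foldl (gpA_step cs) ([], [])).1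
  -- copy.deepcopy of a string is the string itself
  let phonetic_pattern_for_eval :=
    if PySem.Chars.isIn ['_'] phonetic_pattern then
      (((PySem.List.enumerate phonetic_pattern 0).filter (fun x => x.2 == '_')).map (·.1)).foldl
        (gpA_fix cs) phonetic_pattern
    else phonetic_pattern
  let eval_pattern := PySem.Chars.replace phonetic_pattern_for_eval ['_'] []
  let vowel_count := PySem.Chars.count eval_pattern ['1', '1']
  let consonant_count := PySem.Chars.count eval_pattern ['2', '2']
  let phonetic_grade :=
    if consonant_count = 0 ∧ vowel_count = 0 then "Phonetic_A"
    else if consonant_count = 0 ∧ vowel_count = 1 then "Phonetic_B"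
    else if consonant_count ≤ 1 ∧ vowel_count ≤ 1 then "Phonetic_C"
    else "Phonetic_D"
  (phonetic_grade, String.ofList phonetic_pattern)

-- ===== PORT B =====
def gpB_vowels : List Char := ['a', 'e', 'i', 'o', 'u']
def gpB_middle : List Char := ['y', 'w']
-- Source B's set literal: 15 distinct two-letter strings, used only for membership
def gpB_approved : List (List Char) :=
  [['s','s'], ['l','l'], ['o','o'], ['e','e'], ['t','t'], ['r','r'], ['p','p'], ['n','n'],
   ['m','m'], ['f','f'], ['g','g'], ['c','c'], ['d','d'], ['b','b'], ['z','z']]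

-- Source B pass 1: per letter, classify with a one-character lookahead (the next char,
-- i.e. the head of the remaining suffix) and the carried prev_letter
def gpB_pat : List Char → List Char → List Char
  | _, [] => []
  | prev, letter :: rest =>
    let lookahead : Bool := match rest with | c2 :: _ => letter = c2 | [] => false
    let p : Char :=
      if lookahead then '_'
      else if letter ∈ gpB_vowels then '1'
      else if letter ∈ gpB_middle then (if PySem.Chars.isIn prev gpB_vowels then '2' else '1')
      else '2'
    p :: gpB_pat [letter] rest

-- Source B pass 2: streaming counter over (pattern char, letter) pairs; accumulators v, c,
-- prev = the pending kept char (None after a counted pair); pairs[i+1] = head of the rest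
def gpB_count : Nat → Nat → Option Char → List (Char × Char) → Nat × Nat
  | v, c, _, [] => (v, c)
  | v, c, prev, (p, letter) :: rest =>
    let kept? : Option Char :=
      if p = '_' then
        match rest with
        | [] => none  -- unreachable: '_' is never the last pattern char
        | (p2, letter2) :: _ =>
          if [letter, letter2] ∈ gpB_approved then none
          else if p2 = '_' then none
          else some p2
      else some p
    match kept? with
    | none => gpB_count v c prev rest
    | some kept =>
      if prev = some kept then
        if kept = '1' then gpB_count (v + 1) c none rest else gpB_count v (c + 1) none rest
      else gpB_count v c (some kept) rest

def grade_phonetic_alt (text : String) : String × String :=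
  let pattern_chars := gpB_pat [] text.toList
  let vc := gpB_count 0 0 none (pattern_chars.zip text.toList)
  let phonetic_grade :=
    if vc.2 = 0 ∧ vc.1 = 0 then "Phonetic_A"
    else if vc.2 = 0 ∧ vc.1 = 1 then "Phonetic_B"
    else if vc.2 ≤ 1 ∧ vc.1 ≤ 1 then "Phonetic_C"
    else "Phonetic_D"
  (phonetic_grade, String.ofList pattern_chars)

-- ===== PRECONDITION & SPEC =====
def Spec_grade_phonetic (text : String) (out : String × String) : Prop := out = grade_phonetic_alt text
instance (text : String) (out : String × String) : Decidable (Spec_grade_phonetic text out) := by unfold Spec_grade_phonetic; infer_instance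

-- ===== CLAIM (what is proved, stated in full; the proofs are below) =====
def Claim_equal_grade_phonetic : Prop := ∀ (text : String), Dom_grade_phonetic text → Spec_grade_phonetic text (grade_phonetic text)

-- ===== LEMMAS AND PROOFS =====

-- non-overlapping count of the two-char run "aa" (what Python's str.count("aa") computes)
def c2count (a : Char) : List Char → Nat
  | x :: y :: r => if x = a ∧ y = a then c2count a r + 1 else c2count a (y :: r)
  | _ => 0

-- the resolved eval character stream: for each pair, a non-'_' pattern char is kept,
-- an approved '_' is dropped, an unapproved '_' contributes the next pattern char (unless '_')
def keptL : List (Char × Char) → List Char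
  | [] => []
  | (p, c) :: rest =>
    if p = '_' then
      match rest with
      | [] => keptL rest
      | (p2, c2) :: _ =>
        if [c, c2] ∈ gpA_approved then keptL rest
        else if p2 = '_' then keptL rest
        else p2 :: keptL rest
    else p :: keptL rest

-- structural form of A's fixed-up eval pattern (before removing '_')
def especS : List Char → List Char → List Char
  | [], _ => []
  | p :: pat', cs =>
    (if p ≠ '_' then p
     else if [cs.getD 0 ' ', cs.getD 1 ' '] ∈ gpA_approved then '_'
     else pat'.getD 0 ' ') :: especS pat' cs.tail

lemma gp_getD_tail {α : Type} (l : List α) (k : Nat) (d : α) :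
    l.tail.getD k d = l.getD (k + 1) d := by
  cases l <;> simp [List.getD]

lemma gp_approved_eq : gpB_approved = gpA_approved := rfl
lemma gp_vowels_eq : gpB_vowels = gpA_vowels := rfl
lemma gp_middle_eq : gpB_middle = gpA_middle := rfl

lemma c2count_cons_ne (a x : Char) (l : List Char) (h : x ≠ a) :
    c2count a (x :: l) = c2count a l := by
  cases l <;> simp [c2count, h]

lemma c2count_cons_cons_ne (x a b : Char) (l : List Char) (h : a ≠ b) :
    c2count x (a :: b :: l) = c2count x (b :: l) := by
  simp only [c2count]
  rw [if_neg]
  rintro ⟨h1, h2⟩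
  exact h (h1.trans h2.symm)

lemma c2count_pair_self (a : Char) (l : List Char) :
    c2count a (a :: a :: l) = c2count a l + 1 := by
  simp [c2count]

lemma keptL_cons_ne (p c : Char) (rest : List (Char × Char)) (hp : p ≠ '_') :
    keptL ((p, c) :: rest) = p :: keptL rest := by
  simp [keptL, hp]

lemma keptL_skip_app (c p2 c2 : Char) (rest : List (Char × Char))
    (hap : [c, c2] ∈ gpA_approved) :
    keptL (('_', c) :: (p2, c2) :: rest) = keptL ((p2, c2) :: rest) := by
  simp [keptL, hap]

lemma keptL_skip_next (c c2 : Char) (rest : List (Char × Char))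
    (hap : [c, c2] ∉ gpA_approved) :
    keptL (('_', c) :: ('_', c2) :: rest) = keptL (('_', c2) :: rest) := by
  simp [keptL, hap]

lemma keptL_take (c p2 c2 : Char) (rest : List (Char × Char))
    (hap : [c, c2] ∉ gpA_approved) (hp2 : p2 ≠ '_') :
    keptL (('_', c) :: (p2, c2) :: rest) = p2 :: keptL ((p2, c2) :: rest) := by
  simp [keptL, hap, hp2]

lemma gpB_pat_length (cs : List Char) : ∀ prev, (gpB_pat prev cs).length = cs.length := by
  induction cs with
  | nil => intro prev; simp [gpB_pat]
  | cons c rest ih => intro prev; simp [gpB_pat, ih]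

lemma gpB_pat_chars (cs : List Char) : ∀ prev, ∀ x ∈ gpB_pat prev cs, x = '_' ∨ x = '1' ∨ x = '2' := by
  induction cs with
  | nil => intro prev; simp [gpB_pat]
  | cons c rest ih =>
    intro prev x hx
    simp only [gpB_pat, List.mem_cons] at hx
    rcases hx with h | h
    · subst h; split_ifs <;> simp
    · exact ih [c] x h

lemma gpB_pat_last (cs : List Char) : ∀ prev, (gpB_pat prev cs).getLast? ≠ some '_' := by
  induction cs with
  | nil => intro prev; simp [gpB_pat]
  | cons c rest ih =>
    intro prev
    cases rest with
    | nil =>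
      simp only [gpB_pat]
      split_ifs <;> simp_all
    | cons c2 rest' =>
      have hne : gpB_pat [c] (c2 :: rest') ≠ [] := by
        have := gpB_pat_length (c2 :: rest') [c]
        intro h; rw [h] at this; simp at this
      have hcons : ∀ (x : Char) (l : List Char), l ≠ [] → (x :: l).getLast? = l.getLast? := by
        intro x l hl
        cases l with
        | nil => exact absurd rfl hl
        | cons y l' => exact List.getLast?_cons_cons
      have hrw : gpB_pat prev (c :: c2 :: rest') =
          (if (match c2 :: rest' with | c2' :: _ => decide (c = c2') | [] => false) then '_'
           else if c ∈ gpB_vowels then '1'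
           else if c ∈ gpB_middle then (if PySem.Chars.isIn prev gpB_vowels then '2' else '1')
           else '2') :: gpB_pat [c] (c2 :: rest') := rfl
      rw [hrw, hcons _ _ hne]
      exact ih [c]

lemma loop1_eq (suf : List Char) : ∀ (pre acc prev : List Char),
    ((PySem.List.enumerate suf (pre.length : Int)).foldl (gpA_step (pre ++ suf)) (acc, prev)).1
      = acc ++ gpB_pat prev suf := by
  induction suf with
  | nil => intro pre acc prev; simp [PySem.List.enumerate, gpB_pat]
  | cons c rest ih =>
    intro pre acc prev
    rw [PySem.List.enumerate_cons, List.foldl_cons]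
    cases rest with
    | nil =>
      have hcond : ¬(((pre.length : Int) ≠ PySem.List.len (pre ++ [c]) - 1) ∧
          PySem.List.pyGetD (pre ++ [c]) ((pre.length : Int) + 1) ' ' = c) := by
        rintro ⟨h1, -⟩
        apply h1
        simp [PySem.List.len_eq]
      simp only [PySem.List.enumerate, List.foldl_nil, gpA_step, gpB_pat]
      rw [if_neg hcond]
      rfl
    | cons c2 rest' =>
      have hg : PySem.List.pyGetD (pre ++ c :: c2 :: rest') ((pre.length : Int) + 1) ' ' = c2 := by
        have h1 : ((pre.length : Int) + 1) = ((pre.length + 1 : Nat) : Int) := by push_cast; ring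
        rw [h1, PySem.List.pyGetD_natCast, List.getD_eq_getElem?_getD,
          List.getElem?_append_right (by omega)]
        simp
      have hlen : PySem.List.len (pre ++ c :: c2 :: rest') = (pre.length : Int) + 2 + rest'.length := by
        simp [PySem.List.len_eq]
        push_cast
        ring
      have hcond : (((pre.length : Int) ≠ PySem.List.len (pre ++ c :: c2 :: rest') - 1) ∧
          PySem.List.pyGetD (pre ++ c :: c2 :: rest') ((pre.length : Int) + 1) ' ' = c) ↔ c = c2 := by
        rw [hg, hlen]
        constructor
        · rintro ⟨-, h2⟩; exact h2.symm
        · intro h; exact ⟨by omega, h.symm⟩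
      have hstep : gpA_step (pre ++ c :: c2 :: rest') (acc, prev) ((pre.length : Int), c)
          = (acc ++ [if c = c2 then '_'
              else if c ∈ gpA_vowels then '1'
              else if c ∈ gpA_middle then (if PySem.Chars.isIn prev gpA_vowels then '2' else '1')
              else '2'], [c]) := by
        by_cases hc : c = c2
        · simp only [gpA_step]
          rw [if_pos (hcond.mpr hc), if_pos hc]
        · simp only [gpA_step]
          rw [if_neg (fun h => hc (hcond.mp h)), if_neg hc]
      rw [hstep]
      have hpre : ((pre.length : Int) + 1) = (((pre ++ [c]).length : Nat) : Int) := by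
        simp
      have hcs : pre ++ c :: c2 :: rest' = (pre ++ [c]) ++ (c2 :: rest') := by simp
      rw [hpre, hcs]
      rw [ih (pre ++ [c]) (acc ++ [_]) [c]]
      have hB : gpB_pat prev (c :: c2 :: rest') =
          (if (match c2 :: rest' with | c2' :: _ => decide (c = c2') | [] => false) then '_'
           else if c ∈ gpB_vowels then '1'
           else if c ∈ gpB_middle then (if PySem.Chars.isIn prev gpB_vowels then '2' else '1')
           else '2') :: gpB_pat [c] (c2 :: rest') := rfl
      rw [hB]
      have hhead : (if c = c2 then '_'
            else if c ∈ gpA_vowels then '1'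
            else if c ∈ gpA_middle then (if PySem.Chars.isIn prev gpA_vowels then '2' else '1')
            else '2')
          = (if (match c2 :: rest' with | c2' :: _ => decide (c = c2') | [] => false) then '_'
             else if c ∈ gpB_vowels then '1'
             else if c ∈ gpB_middle then (if PySem.Chars.isIn prev gpB_vowels then '2' else '1')
             else '2') := by
        rw [gp_vowels_eq, gp_middle_eq]
        by_cases hc : c = c2
        · rw [if_pos hc, if_pos (show ((decide (c = c2) : Bool) = true) by simp [hc])]
        · rw [if_neg hc, if_neg (show ¬((decide (c = c2) : Bool) = true) by simp [hc])]
      rw [hhead]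
      simp

lemma countgo_pair (a : Char) : ∀ (fuel : Nat) (l : List Char) (acc : Nat), l.length ≤ fuel →
    PySem.Chars.count.go [a, a] fuel l acc = acc + c2count a l := by
  intro fuel
  induction fuel with
  | zero =>
    intro l acc h
    have hl : l = [] := by cases l <;> simp_all
    subst hl
    simp [PySem.Chars.count.go, c2count]
  | succ n ih =>
    intro l acc h
    cases l with
    | nil => simp [PySem.Chars.count.go, c2count]
    | cons x t =>
      rw [PySem.Chars.count.go]
      cases t with
      | nil =>
        have hpre : ([a, a].isPrefixOf [x]) = false := by
          simp [List.isPrefixOf]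
        rw [if_neg (by simp [hpre])]
        have h0 : c2count a [x] = 0 := by simp [c2count]
        rw [h0, ih [] acc (by simp)]
        simp [c2count]
      | cons y r =>
        by_cases hp : x = a ∧ y = a
        · have hpre : ([a, a].isPrefixOf (x :: y :: r)) = true := by
            simp [List.isPrefixOf, hp.1, hp.2]
          rw [if_pos hpre]
          have hd : List.drop [a, a].length (x :: y :: r) = r := by simp
          rw [hd, ih r (acc + 1) (by simp at h; omega)]
          obtain ⟨rfl, rfl⟩ : x = a ∧ y = a := hp
          rw [c2count_pair_self]
          omega
        · have hpre : ([a, a].isPrefixOf (x :: y :: r)) = false := by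
            rw [Bool.eq_false_iff]
            intro hT
            simp [List.isPrefixOf] at hT
            exact hp ⟨hT.1.symm, hT.2.symm⟩
          rw [if_neg (by simp [hpre])]
          rw [ih (y :: r) acc (by simp at h ⊢; omega)]
          have hne : c2count a (x :: y :: r) = c2count a (y :: r) := by
            simp only [c2count]
            rw [if_neg hp]
          rw [hne]

lemma count_pair (a : Char) (l : List Char) : PySem.Chars.count l [a, a] = c2count a l := by
  rw [PySem.Chars.count]
  rw [if_neg (by simp)]
  simpa using countgo_pair a l.length l 0 le_rfl

lemma replacego_del (u : Char) : ∀ (fuel : Nat) (l acc : List Char), l.length ≤ fuel →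
    PySem.Chars.replace.go [u] [] fuel l acc = acc.reverse ++ l.filter (· ≠ u) := by
  intro fuel
  induction fuel with
  | zero =>
    intro l acc h
    have hl : l = [] := by cases l <;> simp_all
    subst hl
    simp [PySem.Chars.replace.go]
  | succ n ih =>
    intro l acc h
    cases l with
    | nil => simp [PySem.Chars.replace.go]
    | cons x t =>
      rw [PySem.Chars.replace.go]
      by_cases hx : x = u
      · have hpre : ([u].isPrefixOf (x :: t)) = true := by simp [List.isPrefixOf, hx]
        rw [if_pos hpre]
        have hd : List.drop [u].length (x :: t) = t := by simp
        rw [hd, ih t _ (by simp at h; omega)]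
        simp [hx]
      · have hpre : ([u].isPrefixOf (x :: t)) = false := by
          rw [Bool.eq_false_iff]
          intro hT
          simp [List.isPrefixOf] at hT
          exact hx hT.symm
        rw [if_neg (by simp [hpre])]
        rw [ih t (x :: acc) (by simp at h ⊢; omega)]
        simp [hx]

lemma replace_del (u : Char) (l : List Char) :
    PySem.Chars.replace l [u] [] = l.filter (· ≠ u) := by
  rw [PySem.Chars.replace]
  rw [if_neg (by simp)]
  simpa using replacego_del u l.length l [] le_rfl

lemma especS_length (pat : List Char) : ∀ cs, (especS pat cs).length = pat.length := by
  induction pat with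
  | nil => simp [especS]
  | cons p pat' ih => intro cs; simp [especS, ih]

lemma especS_getD (pat : List Char) : ∀ (cs : List Char) (k : Nat), k < pat.length →
    (especS pat cs).getD k ' ' =
      (if pat.getD k ' ' ≠ '_' then pat.getD k ' '
       else if [cs.getD k ' ', cs.getD (k + 1) ' '] ∈ gpA_approved then '_'
       else pat.getD (k + 1) ' ') := by
  induction pat with
  | nil => intro cs k hk; simp at hk
  | cons p pat' ih =>
    intro cs k hk
    cases k with
    | zero =>
      simp [especS, gp_getD_tail]
    | succ k =>
      have hk' : k < pat'.length := by simpa using hk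
      simp only [especS, List.getD_cons_succ]
      rw [ih cs.tail k hk', gp_getD_tail, gp_getD_tail]

lemma gp_fix_len (cs : List Char) (I : List Int) : ∀ s : List Char,
    (I.foldl (gpA_fix cs) s).length = s.length := by
  induction I with
  | nil => intro s; simp
  | cons i I' ih =>
    intro s
    rw [List.foldl_cons, ih]
    simp only [gpA_fix]
    split
    · exact PySem.List.length_pySetD s i _
    · rfl

lemma gp_fix_natCast (cs s : List Char) (ki : Nat) :
    gpA_fix cs s (ki : Int) =
      if [cs.getD ki ' ', cs.getD (ki + 1) ' '] ∈ gpA_approved then s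
      else s.set ki (s.getD (ki + 1) ' ') := by
  have h1 : ((ki : Int) + 1) = ((ki + 1 : Nat) : Int) := by push_cast; ring
  rw [gpA_fix, h1]
  simp only [PySem.List.pyGetD_natCast, PySem.List.pySetD_natCast]
  rw [ite_not]

lemma foldE (cs pat : List Char) : ∀ (I : List Int) (s : List Char),
    (∀ i ∈ I, ∃ k : Nat, i = (k : Int) ∧ k < pat.length) →
    I.Pairwise (· < ·) →
    (∀ i ∈ I, ∀ k : Nat, i ≤ (k : Int) → s.getD k ' ' = pat.getD k ' ') →
    s.length = pat.length →
    ∀ k : Nat,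
      (I.foldl (gpA_fix cs) s).getD k ' ' =
        if (k : Int) ∈ I then
          (if [cs.getD k ' ', cs.getD (k + 1) ' '] ∈ gpA_approved then s.getD k ' '
           else pat.getD (k + 1) ' ')
        else s.getD k ' ' := by
  intro I
  induction I with
  | nil => intro s _ _ _ _ k; simp
  | cons i I' ih =>
    intro s hmem hsort hagree hlen k
    obtain ⟨ki, rfl, hki⟩ := hmem i (List.mem_cons_self)
    rw [List.foldl_cons]
    rw [List.pairwise_cons] at hsort
    obtain ⟨hlt, hsort'⟩ := hsort
    have hfix := gp_fix_natCast cs s ki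
    have hlen' : (gpA_fix cs s (ki : Int)).length = s.length := by
      rw [hfix]; split
      · rfl
      · simp
    have hs'ne : ∀ m : Nat, m ≠ ki → (gpA_fix cs s (ki : Int)).getD m ' ' = s.getD m ' ' := by
      intro m hm
      rw [hfix]; split
      · rfl
      · simp only [List.getD_eq_getElem?_getD]
        rw [List.getElem?_set_ne (fun h => hm h.symm)]
    have hagree' : ∀ i ∈ I', ∀ m : Nat, i ≤ (m : Int) →
        (gpA_fix cs s (ki : Int)).getD m ' ' = pat.getD m ' ' := by
      intro i hi m him
      have hik : (ki : Int) < i := hlt i hi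
      have hmne : m ≠ ki := by
        intro h; subst h; omega
      rw [hs'ne m hmne]
      exact hagree i (List.mem_cons_of_mem _ hi) m him
    have hmem' : ∀ i ∈ I', ∃ k : Nat, i = (k : Int) ∧ k < pat.length :=
      fun i hi => hmem i (List.mem_cons_of_mem _ hi)
    have ihr := ih (gpA_fix cs s (ki : Int)) hmem' hsort' hagree' (hlen'.trans hlen) k
    rw [ihr]
    by_cases hk : k = ki
    · subst hk
      have hnotI' : ((k : Int)) ∉ I' := by
        intro h
        have := hlt _ h
        omega
      rw [if_neg hnotI', if_pos (by simp)]
      rw [hfix]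
      by_cases hap : [cs.getD k ' ', cs.getD (k + 1) ' '] ∈ gpA_approved
      · rw [if_pos hap, if_pos hap]
      · rw [if_neg hap, if_neg hap]
        rw [List.getD_eq_getElem?_getD, List.getElem?_set_self (by omega)]
        simp only [Option.getD_some]
        exact hagree (k : Int) List.mem_cons_self (k + 1) (by push_cast; omega)
    · have hmemiff : ((k : Int) ∈ (ki : Int) :: I') ↔ (k : Int) ∈ I' := by
        simp only [List.mem_cons]
        constructor
        · rintro (h | h)
          · exfalso; apply hk; exact_mod_cast h
          · exact h
        · exact Or.inr
      simp only [hmemiff]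
      rw [hs'ne k hk]

lemma underscore_indexes_mem (pat : List Char) (k : Nat) :
    ((k : Int) ∈ ((PySem.List.enumerate pat 0).filter (fun x => x.2 == '_')).map (·.1)) ↔
      (k < pat.length ∧ pat.getD k ' ' = '_') := by
  simp only [List.mem_map, List.mem_filter, PySem.List.mem_enumerate_iff]
  constructor
  · rintro ⟨⟨i, c⟩, ⟨⟨m, hm, hpr⟩, hc⟩, hfst⟩
    simp only [Prod.mk.injEq] at hpr
    obtain ⟨heq1, heq2⟩ := hpr
    subst heq1; subst heq2
    simp only at hfst hc
    have hmk : m = k := by omega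
    subst hmk
    refine ⟨hm, ?_⟩
    rw [List.getD_eq_getElem?_getD, List.getElem?_eq_getElem hm]
    simpa using hc
  · rintro ⟨hk, hu⟩
    refine ⟨((k : Int), '_'), ⟨⟨k, hk, ?_⟩, by simp⟩, rfl⟩
    rw [List.getD_eq_getElem?_getD, List.getElem?_eq_getElem hk] at hu
    simp only [Option.getD_some] at hu
    simp [hu]

lemma underscore_indexes_sorted (pat : List Char) :
    (((PySem.List.enumerate pat 0).filter (fun x => x.2 == '_')).map (·.1)).Pairwise (· < ·) := by
  apply List.Pairwise.map
  · intro a b h; exact h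
  · exact (PySem.List.pairwise_lt_enumerate pat 0).filter _

lemma final_espec (pat cs : List Char) :
    ((((PySem.List.enumerate pat 0).filter (fun x => x.2 == '_')).map (·.1)).foldl
        (gpA_fix cs) pat) = especS pat cs := by
  have hlenf : ((((PySem.List.enumerate pat 0).filter (fun x => x.2 == '_')).map (·.1)).foldl
      (gpA_fix cs) pat).length = pat.length := gp_fix_len cs _ pat
  apply List.ext_getElem (by rw [hlenf, especS_length])
  intro k hk1 hk2
  have hk : k < pat.length := by rwa [hlenf] at hk1
  have h1 := foldE cs pat _ pat
    (fun i hi => by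
      rw [List.mem_map] at hi
      obtain ⟨pr, hpr, rfl⟩ := hi
      rw [List.mem_filter] at hpr
      obtain ⟨hpr1, -⟩ := hpr
      rw [PySem.List.mem_enumerate_iff] at hpr1
      obtain ⟨m, hm, rfl⟩ := hpr1
      exact ⟨m, by simp, hm⟩)
    (underscore_indexes_sorted pat)
    (fun _ _ _ _ => rfl) rfl k
  have h2 := especS_getD pat cs k hk
  have hgd : ∀ (l : List Char) (h : k < l.length), l.getD k ' ' = l[k] := by
    intro l h
    rw [List.getD_eq_getElem?_getD, List.getElem?_eq_getElem h]
    rfl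
  rw [← hgd _ hk1, ← hgd _ hk2, h1, h2]
  by_cases hu : pat.getD k ' ' = '_'
  · rw [if_pos ((underscore_indexes_mem pat k).mpr ⟨hk, hu⟩)]
    rw [if_neg (show ¬pat.getD k ' ' ≠ '_' from fun h => h hu)]
    split
    · exact hu
    · rfl
  · rw [if_neg (fun h => hu ((underscore_indexes_mem pat k).mp h).2), if_pos hu]

lemma espec_no_underscore (pat : List Char) : ∀ cs, (∀ x ∈ pat, x ≠ '_') →
    especS pat cs = pat := by
  induction pat with
  | nil => intro cs _; simp [especS]
  | cons p pat' ih =>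
    intro cs h
    simp only [especS]
    rw [ih cs.tail (fun x hx => h x (List.mem_cons_of_mem _ hx))]
    simp [h p List.mem_cons_self]

lemma filter_especS (pat : List Char) : ∀ cs : List Char, pat.length = cs.length →
    pat.getLast? ≠ some '_' →
    (especS pat cs).filter (· ≠ '_') = keptL (pat.zip cs) := by
  induction pat with
  | nil => intro cs _ _; simp [especS, keptL]
  | cons p pat' ih =>
    intro cs hlen hlast
    cases cs with
    | nil => simp at hlen
    | cons c cs' =>
      cases pat' with
      | nil =>
        have hcs' : cs' = [] := by
          cases cs' with
          | nil => rfl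
          | cons _ _ => simp at hlen
        subst hcs'
        have hp : p ≠ '_' := by simpa using hlast
        rw [List.zip_cons_cons, keptL_cons_ne p c _ hp]
        simp [especS, keptL, hp]
      | cons p2 pat'' =>
        cases cs' with
        | nil => simp at hlen
        | cons c2 cs'' =>
          have hlast' : (p2 :: pat'').getLast? ≠ some '_' := by
            rwa [List.getLast?_cons_cons] at hlast
          have hlen' : (p2 :: pat'').length = (c2 :: cs'').length := by
            simpa using hlen
          have IH := ih (c2 :: cs'') hlen' hlast'
          rw [List.zip_cons_cons] at IH
          rw [List.zip_cons_cons, List.zip_cons_cons]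
          by_cases hp : p = '_'
          · subst hp
            have hhead : especS ('_' :: p2 :: pat'') (c :: c2 :: cs'') =
                (if [c, c2] ∈ gpA_approved then '_' else p2) :: especS (p2 :: pat'') (c2 :: cs'') := by
              simp [especS]
            rw [hhead]
            by_cases hap : [c, c2] ∈ gpA_approved
            · rw [if_pos hap, keptL_skip_app c p2 c2 _ hap,
                List.filter_cons_of_neg (by simp)]
              exact IH
            · rw [if_neg hap]
              by_cases hp2 : p2 = '_'
              · subst hp2
                rw [keptL_skip_next c c2 _ hap, List.filter_cons_of_neg (by simp)]
                exact IH
              · rw [keptL_take c p2 c2 _ hap hp2, List.filter_cons_of_pos (by simp [hp2])]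
                rw [IH]
          · have hhead : especS (p :: p2 :: pat'') (c :: c2 :: cs'') =
                p :: especS (p2 :: pat'') (c2 :: cs'') := by
              simp [especS, hp]
            rw [hhead, List.filter_cons_of_pos (by simp [hp]),
              keptL_cons_ne p c _ hp, IH]

lemma gpB_count_eq (pairs : List (Char × Char)) : ∀ (v c : Nat) (prev : Option Char),
    (∀ pr ∈ pairs, pr.1 = '_' ∨ pr.1 = '1' ∨ pr.1 = '2') →
    (∀ a, prev = some a → (a = '1' ∨ a = '2')) →
    gpB_count v c prev pairs =
      (v + c2count '1' (prev.toList ++ keptL pairs),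
       c + c2count '2' (prev.toList ++ keptL pairs)) := by
  induction pairs with
  | nil =>
    intro v c prev _ _
    have h1 : ∀ x : Char, c2count x prev.toList = 0 := by
      intro x; cases prev <;> simp [c2count]
    simp [gpB_count, keptL, h1]
  | cons pr rest ih =>
    obtain ⟨p, letter⟩ := pr
    intro v c prev hp hprev
    have hp' : ∀ pr ∈ rest, pr.1 = '_' ∨ pr.1 = '1' ∨ pr.1 = '2' :=
      fun pr hpr => hp pr (List.mem_cons_of_mem _ hpr)
    have hmain : ∀ (kept : Char), kept = '1' ∨ kept = '2' →
        keptL ((p, letter) :: rest) = kept :: keptL rest →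
        (if prev = some kept then
          if kept = '1' then gpB_count (v + 1) c none rest else gpB_count v (c + 1) none rest
         else gpB_count v c (some kept) rest) =
          (v + c2count '1' (prev.toList ++ keptL ((p, letter) :: rest)),
           c + c2count '2' (prev.toList ++ keptL ((p, letter) :: rest))) := by
      intro kept hkept hK
      rw [hK]
      by_cases hpe : prev = some kept
      · rw [if_pos hpe, hpe]
        simp only [Option.toList_some, List.cons_append, List.nil_append]
        rcases hkept with h1 | h1 <;> subst h1
        · rw [if_pos rfl, ih (v + 1) c none hp' (by simp)]
          rw [c2count_pair_self]
          rw [c2count_cons_ne '2' '1' _ (by decide), c2count_cons_ne '2' '1' _ (by decide)]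
          simp only [Option.toList_none, List.nil_append]
          refine Prod.ext ?_ ?_ <;> simp <;> omega
        · rw [if_neg (by decide), ih v (c + 1) none hp' (by simp)]
          rw [c2count_pair_self]
          rw [c2count_cons_ne '1' '2' _ (by decide), c2count_cons_ne '1' '2' _ (by decide)]
          simp only [Option.toList_none, List.nil_append]
          refine Prod.ext ?_ ?_ <;> simp <;> omega
      · rw [if_neg hpe]
        rw [ih v c (some kept) hp' (fun a ha => by rw [← Option.some.inj ha]; exact hkept)]
        cases prev with
        | none => simp
        | some a =>
          have hane : a ≠ kept := fun h => hpe (by rw [h])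
          simp only [Option.toList_some, List.cons_append, List.nil_append]
          rw [c2count_cons_cons_ne '1' a kept _ hane, c2count_cons_cons_ne '2' a kept _ hane]
    by_cases hpu : p = '_'
    · subst hpu
      cases rest with
      | nil =>
        have h1 : ∀ x : Char, c2count x prev.toList = 0 := by
          intro x; cases prev <;> simp [c2count]
        simp [gpB_count, keptL, h1]
      | cons pr2 rest' =>
        obtain ⟨p2, letter2⟩ := pr2
        by_cases hap : [letter, letter2] ∈ gpB_approved
        · have hL : gpB_count v c prev (('_', letter) :: (p2, letter2) :: rest') =
              gpB_count v c prev ((p2, letter2) :: rest') := by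
            simp [gpB_count, hap]
          rw [hL, keptL_skip_app letter p2 letter2 _ (gp_approved_eq ▸ hap)]
          exact ih v c prev hp' hprev
        · have hapA : [letter, letter2] ∉ gpA_approved := fun h => hap (gp_approved_eq ▸ h)
          by_cases hp2 : p2 = '_'
          · subst hp2
            have hL : gpB_count v c prev (('_', letter) :: ('_', letter2) :: rest') =
                gpB_count v c prev (('_', letter2) :: rest') := by
              simp [gpB_count, hap]
            rw [hL, keptL_skip_next letter letter2 _ hapA]
            exact ih v c prev hp' hprev
          · have hkept : p2 = '1' ∨ p2 = '2' := by
              rcases hp ⟨p2, letter2⟩ (by simp) with h | h | h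
              · exact absurd h hp2
              · exact Or.inl h
              · exact Or.inr h
            have hL : gpB_count v c prev (('_', letter) :: (p2, letter2) :: rest') =
                (if prev = some p2 then
                  if p2 = '1' then gpB_count (v + 1) c none ((p2, letter2) :: rest')
                  else gpB_count v (c + 1) none ((p2, letter2) :: rest')
                 else gpB_count v c (some p2) ((p2, letter2) :: rest')) := by
              simp [gpB_count, hap, hp2]
            rw [hL]
            exact hmain p2 hkept (keptL_take letter p2 letter2 _ hapA hp2)
    · have hkept : p = '1' ∨ p = '2' := by
        rcases hp ⟨p, letter⟩ (by simp) with h | h | h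
        · exact absurd h hpu
        · exact Or.inl h
        · exact Or.inr h
      have hL : gpB_count v c prev ((p, letter) :: rest) =
          (if prev = some p then
            if p = '1' then gpB_count (v + 1) c none rest
            else gpB_count v (c + 1) none rest
           else gpB_count v c (some p) rest) := by
        simp [gpB_count, hpu]
      rw [hL]
      exact hmain p hkept (keptL_cons_ne p letter _ hpu)

-- ===== VERDICT (by name: the statement is the Claim_ definition above) =====
theorem grade_phonetic_spec : Claim_equal_grade_phonetic := by
  intro text _
  unfold Spec_grade_phonetic grade_phonetic grade_phonetic_alt
  simp only []
  have h1 : ((PySem.List.enumerate text.toList 0).foldl (gpA_step text.toList) ([], [])).1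
      = gpB_pat [] text.toList := by
    have := loop1_eq text.toList [] [] []
    simpa using this
  rw [h1]
  set cs := text.toList with hcs
  set pat := gpB_pat [] cs with hpat
  have hppe : (if PySem.Chars.isIn ['_'] pat then
      (((PySem.List.enumerate pat 0).filter (fun x => x.2 == '_')).map (·.1)).foldl
        (gpA_fix cs) pat
      else pat) = especS pat cs := by
    by_cases hin : PySem.Chars.isIn ['_'] pat
    · rw [if_pos hin, final_espec]
    · rw [if_neg hin]
      have hno : ∀ x ∈ pat, x ≠ '_' := by
        intro x hx he
        subst he
        apply hin
        obtain ⟨s, t, hst⟩ := List.append_of_mem hx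
        rw [PySem.Chars.isIn_iff_infix, hst]
        exact ⟨s, t, by simp⟩
      exact (espec_no_underscore pat cs hno).symm
  rw [hppe]
  have hfilters : PySem.Chars.replace (especS pat cs) ['_'] [] = keptL (pat.zip cs) := by
    rw [replace_del]
    exact filter_especS pat cs (by rw [hpat, gpB_pat_length]) (gpB_pat_last cs [])
  rw [hfilters]
  have hcnt := gpB_count_eq (pat.zip cs) 0 0 none
    (fun pr hpr => gpB_pat_chars cs [] pr.1 (List.of_mem_zip hpr).1)
    (by simp)
  rw [hcnt, count_pair, count_pair]
  simp
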